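-- pv_equiv track=rewrite | github.com/mortyc126-debug/SHA-256 | exp25_rate_theory.py | carry_vec
-- ===== SOURCE A (Python) =====
-- def carry_vec(a, b):
--     c_out = []
--     c = 0
--     for i in range(32):
--         s = ((a>>i)&1)+((b>>i)&1)+c
--         c = 1 if s>=2 else 0
--         c_out.append(c)
--     return c_out
-- ===== SOURCE B (Python) =====
-- def carry_vec(a, b):
--     s = a + b
--     return [((s >> (i + 1)) & 1) ^ ((a >> (i + 1)) & 1) ^ ((b >> (i + 1)) & 1)
--             for i in range(32)]
-- ===== Notes on version B (the rewrite author's own statement) =====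
-- stated objective: alternative
-- what changed: A maintains a sequential running carry through 32 loop iterations; B computes the full sum s = a + b once and reads each carry independently as the XOR of bit i+1 of s, a and b (carry_in = s ^ a ^ b), so no carry state is propagated.
import Mathlib
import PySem

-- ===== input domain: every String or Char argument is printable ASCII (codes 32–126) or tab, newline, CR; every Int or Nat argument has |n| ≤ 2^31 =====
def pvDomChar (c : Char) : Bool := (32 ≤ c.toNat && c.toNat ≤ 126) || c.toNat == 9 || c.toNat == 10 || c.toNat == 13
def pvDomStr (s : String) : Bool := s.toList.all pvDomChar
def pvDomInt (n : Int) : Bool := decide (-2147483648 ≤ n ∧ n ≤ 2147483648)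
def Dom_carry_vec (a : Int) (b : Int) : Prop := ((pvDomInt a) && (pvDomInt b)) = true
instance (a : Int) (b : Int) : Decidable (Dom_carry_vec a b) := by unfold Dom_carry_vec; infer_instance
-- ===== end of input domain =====

-- B replaces A's sequential carry recurrence by 32 independent entries read off the
-- precomputed sum a + b via the addition identity carry_in = s ⊕ a ⊕ b (objective: alternative).

-- ===== PORT A =====
-- running carry c, appending the carry-out of each bit position 0..31
def carry_vec (a : Int) (b : Int) : List Int :=
  ((PySem.List.pyRange 0 32 1).foldl
    (fun (st : List Int × Int) (i : Int) =>
      let s : Int := PySem.Int.band (a >>> i.toNat) 1 + PySem.Int.band (b >>> i.toNat) 1 + st.2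
      let c : Int := if s ≥ 2 then 1 else 0
      (st.1 ++ [c], c))
    ([], 0)).1

-- ===== PORT B =====
-- entry i = bit (i+1) of (a+b) XOR bit (i+1) of a XOR bit (i+1) of b, each independent
def carry_vec_alt (a : Int) (b : Int) : List Int :=
  let s : Int := a + b
  (PySem.List.pyRange 0 32 1).map (fun i =>
    PySem.Int.bxor
      (PySem.Int.bxor (PySem.Int.band (s >>> ((i.toNat + 1 : Nat))) 1)
                      (PySem.Int.band (a >>> ((i.toNat + 1 : Nat))) 1))
      (PySem.Int.band (b >>> ((i.toNat + 1 : Nat))) 1))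

-- ===== PRECONDITION & SPEC =====
def Spec_carry_vec (a : Int) (b : Int) (out : List Int) : Prop := out = carry_vec_alt a b
instance (a : Int) (b : Int) (out : List Int) : Decidable (Spec_carry_vec a b out) := by unfold Spec_carry_vec; infer_instance

-- ===== CLAIM (what is proved, stated in full; the proofs are below) =====
def Claim_equal_carry_vec : Prop := ∀ (a : Int) (b : Int), Dom_carry_vec a b → Spec_carry_vec a b (carry_vec a b)

-- ===== LEMMAS AND PROOFS =====

-- bit n of x, as both ports compute it
def pbit (x : Int) (n : Nat) : Int := PySem.Int.band (x >>> n) 1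

-- the carry-out sequence of A's loop: pcarry a b n = carry out of bit n-1 (carry into bit n)
def pcarry (a b : Int) : Nat → Int
  | 0 => 0
  | n + 1 => if pbit a n + pbit b n + pcarry a b n ≥ 2 then 1 else 0

theorem band1 (z : Int) : PySem.Int.band z 1 = z % 2 := by
  rw [PySem.Int.band_one]
  show z.fmod 2 = z % 2
  exact Int.fmod_eq_emod_of_nonneg z (by norm_num)

theorem pbit_eq (x : Int) (n : Nat) : pbit x n = (x / 2 ^ n) % 2 := by
  rw [pbit, band1, Int.shiftRight_eq_div_pow]
  norm_cast

theorem divmod_uniq (b q r : Int) (h1 : 0 ≤ r) (h2 : r < b) :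
    (b * q + r) / b = q ∧ (b * q + r) % b = r := by
  constructor
  · rw [mul_comm, add_comm, Int.add_mul_ediv_right r q (by omega : b ≠ 0),
        Int.ediv_eq_zero_of_lt h1 h2, zero_add]
  · rw [add_comm, Int.add_mul_emod_self_left, Int.emod_eq_of_lt h1 h2]

-- floor of (N*t + r')/(2N) for t ∈ [0,3], r' ∈ [0,N): 1 iff t ≥ 2
theorem div2N (N t r' : Int) (hN : 0 < N) (ht0 : 0 ≤ t) (ht3 : t ≤ 3)
    (hr0 : 0 ≤ r') (hrN : r' < N) :
    (N * t + r') / (2 * N) = if t ≥ 2 then 1 else 0 := by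
  interval_cases t
  · rw [show N * 0 + r' = r' by ring, Int.ediv_eq_zero_of_lt hr0 (by omega)]; norm_num
  · rw [Int.ediv_eq_zero_of_lt (by omega) (by omega)]; norm_num
  · rw [show N * 2 + r' = (2 * N) * 1 + r' by ring,
        (divmod_uniq (2 * N) 1 r' hr0 (by omega)).1]; norm_num
  · rw [show N * 3 + r' = (2 * N) * 1 + (N + r') by ring,
        (divmod_uniq (2 * N) 1 (N + r') (by omega) (by omega)).1]; norm_num

-- x mod 2N = N * (bit n of x) + x mod N
theorem emod_double (x N : Int) (hN : 0 < N) :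
    x % (2 * N) = N * ((x / N) % 2) + x % N := by
  have e1 : N * (x / N) + x % N = x := Int.ediv_add_emod x N
  have e2 : 2 * (x / N / 2) + (x / N) % 2 = x / N := Int.ediv_add_emod (x / N) 2
  have hb0 : 0 ≤ (x / N) % 2 := Int.emod_nonneg _ (by omega)
  have hb1 : (x / N) % 2 < 2 := Int.emod_lt_of_pos _ (by omega)
  have hr0 : 0 ≤ x % N := Int.emod_nonneg _ (by omega)
  have hr1 : x % N < N := Int.emod_lt_of_pos _ hN
  have hx : x = (2 * N) * (x / N / 2) + (N * ((x / N) % 2) + x % N) := by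
    linear_combination -e1 - N * e2
  calc x % (2 * N) = ((2 * N) * (x / N / 2) + (N * ((x / N) % 2) + x % N)) % (2 * N) := by
        rw [← hx]
    _ = N * ((x / N) % 2) + x % N := by
        rcases (by omega : (x / N) % 2 = 0 ∨ (x / N) % 2 = 1) with h | h <;>
          · rw [h]
            exact (divmod_uniq (2 * N) (x / N / 2) _ (by omega) (by omega)).2

-- the running carry has the closed form (a mod 2^n + b mod 2^n) / 2^n
theorem pcarry_eq (a b : Int) (n : Nat) :
    pcarry a b n = (a % 2 ^ n + b % 2 ^ n) / 2 ^ n := by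
  induction n with
  | zero => simp [pcarry]
  | succ n ih =>
    set N : Int := 2 ^ n with hNdef
    have hN : 0 < N := by positivity
    have hra0 : 0 ≤ a % N := Int.emod_nonneg _ (by omega)
    have hraN : a % N < N := Int.emod_lt_of_pos _ hN
    have hrb0 : 0 ≤ b % N := Int.emod_nonneg _ (by omega)
    have hrbN : b % N < N := Int.emod_lt_of_pos _ hN
    have habit0 : 0 ≤ (a / N) % 2 := Int.emod_nonneg _ (by omega)
    have habit1 : (a / N) % 2 < 2 := Int.emod_lt_of_pos _ (by omega)
    have hbbit0 : 0 ≤ (b / N) % 2 := Int.emod_nonneg _ (by omega)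
    have hbbit1 : (b / N) % 2 < 2 := Int.emod_lt_of_pos _ (by omega)
    -- split the sum of residues by N
    have eS : N * ((a % N + b % N) / N) + (a % N + b % N) % N = a % N + b % N :=
      Int.ediv_add_emod _ N
    have hK0 : 0 ≤ (a % N + b % N) / N := Int.ediv_nonneg (by omega) (by omega)
    have hK1 : (a % N + b % N) / N ≤ 1 := by
      by_contra h
      have h2 : 2 ≤ (a % N + b % N) / N := by omega
      have hr0 : 0 ≤ (a % N + b % N) % N := Int.emod_nonneg _ (by omega)
      nlinarith
    have hr'0 : 0 ≤ (a % N + b % N) % N := Int.emod_nonneg _ (by omega)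
    have hr'N : (a % N + b % N) % N < N := Int.emod_lt_of_pos _ hN
    have hpow : (2 : Int) ^ (n + 1) = 2 * N := by rw [hNdef]; ring
    rw [pcarry, ih, pbit_eq, pbit_eq, hpow, ← hNdef, emod_double a N hN, emod_double b N hN]
    have hsum : N * ((a / N) % 2) + a % N + (N * ((b / N) % 2) + b % N)
        = N * ((a / N) % 2 + (b / N) % 2 + (a % N + b % N) / N) + (a % N + b % N) % N := by
      linear_combination -eS
    rw [hsum, div2N N _ _ hN (by omega) (by omega) hr'0 hr'N]

theorem pcarry_bit (a b : Int) (n : Nat) : pcarry a b n = 0 ∨ pcarry a b n = 1 := by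
  cases n with
  | zero => left; rfl
  | succ n => rw [pcarry]; split <;> simp

-- bit n of a+b decomposes as shift a + shift b + carry
theorem shift_sum (a b : Int) (n : Nat) :
    (a + b) >>> n = a >>> n + b >>> n + pcarry a b n := by
  set N : Int := 2 ^ n with hNdef
  have hN : 0 < N := by positivity
  have e1 : N * (a / N) + a % N = a := Int.ediv_add_emod a N
  have e2 : N * (b / N) + b % N = b := Int.ediv_add_emod b N
  have eS : N * ((a % N + b % N) / N) + (a % N + b % N) % N = a % N + b % N :=
    Int.ediv_add_emod _ N
  have hr'0 : 0 ≤ (a % N + b % N) % N := Int.emod_nonneg _ (by omega)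
  have hr'N : (a % N + b % N) % N < N := Int.emod_lt_of_pos _ hN
  have hx : a + b = N * (a / N + b / N + (a % N + b % N) / N) + (a % N + b % N) % N := by
    linear_combination -e1 - e2 - eS
  have hsh : ∀ x : Int, x >>> n = x / N := fun x => by
    rw [Int.shiftRight_eq_div_pow, hNdef]; norm_cast
  rw [hsh, hsh, hsh, pcarry_eq, ← hNdef, hx, (divmod_uniq N _ _ hr'0 hr'N).1]

-- per-index agreement: B's xor of three bits at position n+1 equals A's carry-out of bit n
theorem entry_eq (a b : Int) (n : Nat) :
    PySem.Int.bxor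
      (PySem.Int.bxor (PySem.Int.band ((a + b) >>> (n + 1)) 1)
                      (PySem.Int.band (a >>> (n + 1)) 1))
      (PySem.Int.band (b >>> (n + 1)) 1) = pcarry a b (n + 1) := by
  have hx0 : 0 ≤ (a >>> (n + 1)) % 2 := Int.emod_nonneg _ (by omega)
  have hx1 : (a >>> (n + 1)) % 2 < 2 := Int.emod_lt_of_pos _ (by omega)
  have hy0 : 0 ≤ (b >>> (n + 1)) % 2 := Int.emod_nonneg _ (by omega)
  have hy1 : (b >>> (n + 1)) % 2 < 2 := Int.emod_lt_of_pos _ (by omega)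
  have hs : (PySem.Int.band ((a + b) >>> (n + 1)) 1)
      = ((a >>> (n + 1)) % 2 + (b >>> (n + 1)) % 2 + pcarry a b (n + 1)) % 2 := by
    rw [band1, shift_sum]; omega
  rw [hs, band1, band1]
  rcases pcarry_bit a b (n + 1) with hk | hk <;>
    rcases (by omega : (a >>> (n + 1)) % 2 = 0 ∨ (a >>> (n + 1)) % 2 = 1) with hxa | hxa <;>
      rcases (by omega : (b >>> (n + 1)) % 2 = 0 ∨ (b >>> (n + 1)) % 2 = 1) with hxb | hxb <;>
        rw [hk, hxa, hxb] <;> decide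

theorem toNat_ofNat' (k : Nat) : (Int.ofNat k).toNat = k := rfl

theorem hrange32 : PySem.List.pyRange 0 32 1 = (List.range 32).map Int.ofNat := by
  decide

-- A's fold over range m produces the carry-out sequence together with the final carry
theorem foldA (a b : Int) (m : Nat) :
    ((List.range m).map Int.ofNat).foldl
      (fun (st : List Int × Int) (i : Int) =>
        let s : Int := PySem.Int.band (a >>> i.toNat) 1 + PySem.Int.band (b >>> i.toNat) 1 + st.2
        let c : Int := if s ≥ 2 then 1 else 0
        (st.1 ++ [c], c))
      ([], 0)
    = ((List.range m).map (fun n => pcarry a b (n + 1)), pcarry a b m) := by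
  induction m with
  | zero => rfl
  | succ m ih =>
    rw [List.range_succ, List.map_append, List.map_append, List.foldl_append, ih]
    simp only [List.map_cons, List.map_nil, List.foldl_cons, List.foldl_nil,
      toNat_ofNat']
    rfl

-- ===== VERDICT (by name: the statement is the Claim_ definition above) =====
theorem carry_vec_spec : Claim_equal_carry_vec := by
  intro a b _
  show carry_vec a b = carry_vec_alt a b
  have hA : carry_vec a b = ((PySem.List.pyRange 0 32 1).foldl
      (fun (st : List Int × Int) (i : Int) =>
        let s : Int := PySem.Int.band (a >>> i.toNat) 1 + PySem.Int.band (b >>> i.toNat) 1 + st.2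
        let c : Int := if s ≥ 2 then 1 else 0
        (st.1 ++ [c], c))
      ([], 0)).1 := rfl
  have hB : carry_vec_alt a b = (PySem.List.pyRange 0 32 1).map (fun i =>
      PySem.Int.bxor
        (PySem.Int.bxor (PySem.Int.band ((a + b) >>> ((i.toNat + 1 : Nat))) 1)
                        (PySem.Int.band (a >>> ((i.toNat + 1 : Nat))) 1))
        (PySem.Int.band (b >>> ((i.toNat + 1 : Nat))) 1)) := rfl
  rw [hA, hB, hrange32, foldA, List.map_map]
  dsimp only
  refine List.map_congr_left fun n _ => ?_
  simp only [Function.comp_apply, toNat_ofNat']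
  exact (entry_eq a b n).symm
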